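-- pv_equiv track=rewrite | github.com/Sasinyork/movenet-lightning | helpers/squat_analyzer.py | get_primary_issue
-- ===== SOURCE A (Python) =====
-- def get_primary_issue(issues):
--     """Get the most important issue to address."""
--     if not issues:
--         return None
--
--     # Prioritize by severity and type
--     priority_order = ['back_rounding', 'knee_valgus', 'knee_alignment',
--                      'insufficient_depth', 'shoulder_tilt', 'arm_position']
--
--     for priority_type in priority_order:
--         for issue in issues:
--             if issue['type'] == priority_type:
--                 return issue
--
--     return issues[0]  # Return first issue if no priority match
-- ===== SOURCE B (Python) =====
-- def get_primary_issue(issues):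
--     """Get the most important issue to address."""
--     if not issues:
--         return None
--
--     priority_order = ['back_rounding', 'knee_valgus', 'knee_alignment',
--                       'insufficient_depth', 'shoulder_tilt', 'arm_position']
--     rank = {t: i for i, t in enumerate(priority_order)}
--     return min(issues, key=lambda issue: rank.get(issue['type'], len(priority_order)))
-- ===== Notes on version B (the rewrite author's own statement) =====
-- stated objective: idiomatic
-- what changed: Replaces the nested scan (one pass over issues per priority type) by a single min() pass keyed by a precomputed rank table mapping each priority type to its index, with len(priority_order) as the default rank so unknown types fall back to the first issue and min's first-minimum rule preserves tie-breaking.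
-- outside the precondition, e.g. on get_primary_issue([{'type': 'back_rounding'}, {}]): A returns {'type': 'back_rounding'}, B raises KeyError
import Mathlib
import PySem

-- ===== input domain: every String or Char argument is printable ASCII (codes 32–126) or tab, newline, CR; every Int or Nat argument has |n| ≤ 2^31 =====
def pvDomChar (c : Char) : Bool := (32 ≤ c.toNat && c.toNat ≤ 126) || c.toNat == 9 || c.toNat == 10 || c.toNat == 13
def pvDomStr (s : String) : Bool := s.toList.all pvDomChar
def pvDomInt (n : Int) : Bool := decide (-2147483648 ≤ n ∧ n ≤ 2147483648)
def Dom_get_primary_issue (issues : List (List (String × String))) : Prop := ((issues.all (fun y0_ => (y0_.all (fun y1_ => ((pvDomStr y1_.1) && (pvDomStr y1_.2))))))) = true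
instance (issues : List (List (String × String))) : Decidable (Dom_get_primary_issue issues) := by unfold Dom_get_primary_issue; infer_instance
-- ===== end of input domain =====

-- B replaces A's nested priority-by-priority scans with one min() pass over a precomputed rank table (idiomatic, single pass).


-- ===== PORT A =====
def pvPriority : List String :=
  ["back_rounding", "knee_valgus", "knee_alignment", "insufficient_depth", "shoulder_tilt", "arm_position"]

-- inner loop: 'for issue in issues: if issue['type'] == priority_type: return issue'.
-- issue['type'] is a first-match dict lookup; a missing key (Python: KeyError) is treated as a
-- non-match here — exact on Pre_, which admits only issues whose 'type' lookup succeeds.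
def pvScanA (t : String) : List (List (String × String)) → Option (List (String × String))
  | [] => none
  | issue :: rest => if issue.lookup "type" == some t then some issue else pvScanA t rest

-- outer loop: 'for priority_type in priority_order: …'
def pvLoopA (issues : List (List (String × String))) : List String → Option (List (String × String))
  | [] => none
  | t :: ts =>
    match pvScanA t issues with
    | some issue => some issue
    | none => pvLoopA issues ts

def get_primary_issue (issues : List (List (String × String))) : Option (List (String × String)) :=
  match issues with
  | [] => none
  | first :: _ =>
    match pvLoopA issues pvPriority with
    | some issue => some issue
    | none => some first

-- ===== PORT B =====
-- rank = {t: i for i, t in enumerate(priority_order)}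
def pvRank : PySem.Dict String Int :=
  (PySem.List.enumerate pvPriority).foldl (fun d p => d.insert p.2 p.1) PySem.Dict.empty

-- key=lambda issue: rank.get(issue['type'], len(priority_order)); issue['type'] is a
-- first-match lookup; a missing key (Python: KeyError) takes the default rank 6 here — exact
-- on Pre_, which admits only issues whose 'type' lookup succeeds.
def pvKeyB (issue : List (String × String)) : Int :=
  match issue.lookup "type" with
  | some t => pvRank.getD t 6
  | none => 6

def get_primary_issue_alt (issues : List (List (String × String))) : Option (List (String × String)) :=
  match issues with
  | [] => none
  | _ :: _ => PySem.List.min? issues pvKeyB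

-- ===== PRECONDITION & SPEC =====
-- Pre_ excludes issues lists containing an issue without a 'type' key: issue['type'] raises
-- KeyError in both programs there; A may still return on some such lists (an earlier
-- 'back_rounding' issue short-circuits its first scan before the KeyError is reached), while
-- B's single pass evaluates every issue's 'type' and raises.
def Pre_get_primary_issue (issues : List (List (String × String))) : Prop :=
  ∀ issue ∈ issues, (issue.lookup "type").isSome = true
instance (issues : List (List (String × String))) : Decidable (Pre_get_primary_issue issues) := by unfold Pre_get_primary_issue; infer_instance

def pvWitness_get_primary_issue : (List (List (String × String))) :=
  [[("type", "arm_position")], [("type", "back_rounding"), ("side", "left")], [("type", "twist")]]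

def Spec_get_primary_issue (issues : List (List (String × String))) (out : Option (List (String × String))) : Prop := out = get_primary_issue_alt issues
instance (issues : List (List (String × String))) (out : Option (List (String × String))) : Decidable (Spec_get_primary_issue issues out) := by unfold Spec_get_primary_issue; infer_instance

-- ===== CLAIM (what is proved, stated in full; the proofs are below) =====
def Claim_equal_get_primary_issue : Prop := ∀ (issues : List (List (String × String))), Dom_get_primary_issue issues → Pre_get_primary_issue issues → Spec_get_primary_issue issues (get_primary_issue issues)

-- ===== LEMMAS AND PROOFS =====

-- 'first minimum under key': xs splits as l ++ m :: t with strictly larger keys before m and no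
-- smaller key after m.  Both A's result and B's result satisfy this, and it is unique.
def pvIsFirstMin (key : List (String × String) → Int) (xs : List (List (String × String)))
    (m : List (String × String)) : Prop :=
  ∃ l t, xs = l ++ m :: t ∧ (∀ y ∈ l, key m < key y) ∧ (∀ y ∈ t, key m ≤ key y)

lemma pvIsFirstMin_unique {key xs m m'} (h : pvIsFirstMin key xs m) (h' : pvIsFirstMin key xs m') :
    m = m' := by
  obtain ⟨l, t, rfl, hl, ht⟩ := h
  obtain ⟨l', t', he, hl', ht'⟩ := h'
  rcases (List.append_eq_append_iff.mp he) with ⟨a, ha1, ha2⟩ | ⟨c, hc1, hc2⟩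
  · cases a with
    | nil => simp at ha2; exact ha2.1
    | cons x a' =>
      rw [List.cons_append] at ha2
      obtain ⟨rfl, h2⟩ := List.cons_eq_cons.mp ha2
      have hmem : m ∈ l' := ha1 ▸ (List.mem_append.mpr (Or.inr (List.mem_cons_self)))
      have h1 : key m' < key m := hl' _ hmem
      have hmem2 : m' ∈ t := by
        rw [h2]; exact List.mem_append.mpr (Or.inr (List.mem_cons_self))
      have h2' : key m ≤ key m' := ht _ hmem2
      omega
  · cases c with
    | nil => simp at hc2; exact hc2.1.symm
    | cons x c' =>
      rw [List.cons_append] at hc2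
      obtain ⟨rfl, h2⟩ := List.cons_eq_cons.mp hc2
      have hmem : m' ∈ l := hc1 ▸ (List.mem_append.mpr (Or.inr (List.mem_cons_self)))
      have h1 : key m < key m' := hl _ hmem
      have hmem2 : m ∈ t' := by
        rw [h2]; exact List.mem_append.mpr (Or.inr (List.mem_cons_self))
      have h2' : key m' ≤ key m := ht' _ hmem2
      omega

lemma pvFirstMin_le {key : List (String × String) → Int} {xs m} (h : pvIsFirstMin key xs m) :
    ∀ y ∈ xs, key m ≤ key y := by
  obtain ⟨l, t, rfl, hl, ht⟩ := h
  intro y hy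
  rcases List.mem_append.mp hy with hy | hy
  · exact le_of_lt (hl y hy)
  · rcases List.mem_cons.mp hy with rfl | hy
    · exact le_refl _
    · exact ht y hy

-- ----- B side: min? returns the first minimum -----
-- the running state of B's single pass (Python's min fold: a new element wins only strictly)
def pvRun (key : List (String × String) → Int) (m : List (String × String)) :
    List (List (String × String)) → List (String × String)
  | [] => m
  | x :: t => if key x < key m then pvRun key x t else pvRun key m t

lemma pvMin?_cons (key : List (String × String) → Int) :
    ∀ (t : List (List (String × String))) (x : List (String × String)),
      PySem.List.min? (x :: t) key = some (pvRun key x t) := by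
  intro t
  induction t with
  | nil => intro x; rfl
  | cons y t ih =>
    intro x
    have h1 : PySem.List.min? (x :: y :: t) key =
        if key y < key x then PySem.List.min? (y :: t) key else PySem.List.min? (x :: t) key := by
      by_cases h : key y < key x <;> simp [PySem.List.min?, List.foldl_cons, h]
    have h2 : pvRun key x (y :: t) = if key y < key x then pvRun key y t else pvRun key x t := rfl
    rw [h1, h2]
    by_cases h : key y < key x <;> simp [h, ih]

lemma pvRun_firstMin (key : List (String × String) → Int) :
    ∀ (xs : List (List (String × String))) (m : List (String × String)),
      pvIsFirstMin key (m :: xs) (pvRun key m xs) := by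
  intro xs
  induction xs with
  | nil => exact fun m => ⟨[], [], rfl, by simp, by simp⟩
  | cons x t ih =>
    intro m
    have hrw : pvRun key m (x :: t) = if key x < key m then pvRun key x t else pvRun key m t := rfl
    by_cases h : key x < key m
    · rw [hrw, if_pos h]
      obtain ⟨l, r, he, hl, hr⟩ := ih x
      refine ⟨m :: l, r, ?_, ?_, hr⟩
      · rw [List.cons_append, ← he]
      · intro y hy
        have hle : key (pvRun key x t) ≤ key x := pvFirstMin_le (ih x) x List.mem_cons_self
        rcases List.mem_cons.mp hy with rfl | hy
        · omega
        · exact hl y hy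
    · rw [hrw, if_neg h]
      obtain ⟨l, r, he, hl, hr⟩ := ih m
      cases l with
      | nil =>
        simp only [List.nil_append] at he
        obtain ⟨h1, h2⟩ := List.cons_eq_cons.mp he
        rw [← h1]
        refine ⟨[], x :: t, rfl, by simp, ?_⟩
        intro y hy
        rcases List.mem_cons.mp hy with rfl | hy
        · omega
        · rw [h1]
          exact pvFirstMin_le (ih m) y (List.mem_cons_of_mem _ hy)
      | cons z l' =>
        rw [List.cons_append] at he
        obtain ⟨rfl, h2⟩ := List.cons_eq_cons.mp he
        have hzl : key (pvRun key m t) < key m := hl m List.mem_cons_self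
        refine ⟨m :: x :: l', r, ?_, ?_, hr⟩
        · rw [List.cons_append, List.cons_append, ← h2]
        · intro y hy
          rcases List.mem_cons.mp hy with rfl | hy
          · exact hzl
          rcases List.mem_cons.mp hy with rfl | hy
          · omega
          · exact hl y (List.mem_cons_of_mem _ hy)

lemma pvMin?_firstMin {key : List (String × String) → Int}
    (xs : List (List (String × String))) (m : List (String × String))
    (h : PySem.List.min? xs key = some m) : pvIsFirstMin key xs m := by
  cases xs with
  | nil => simp [PySem.List.min?] at h
  | cons x t =>
    rw [pvMin?_cons key t x] at h
    rw [← Option.some_inj.mp h]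
    exact pvRun_firstMin key t x

-- ----- key facts -----
lemma pvRank_getD (t : String) : pvRank.getD t 6 =
    if "back_rounding" == t then 0 else if "knee_valgus" == t then 1
    else if "knee_alignment" == t then 2 else if "insufficient_depth" == t then 3
    else if "shoulder_tilt" == t then 4 else if "arm_position" == t then 5 else 6 := by
  have h : pvRank = PySem.Dict.mk [("back_rounding", 0), ("knee_valgus", 1), ("knee_alignment", 2),
      ("insufficient_depth", 3), ("shoulder_tilt", 4), ("arm_position", 5)] := by rfl
  simp only [h, PySem.Dict.getD, PySem.Dict.get?_mk_cons]
  split_ifs <;> simp_all [PySem.Dict.get?]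

lemma pvKeyB_range (x : List (String × String)) : 0 ≤ pvKeyB x ∧ pvKeyB x ≤ 6 := by
  cases h : x.lookup "type" with
  | none => simp [pvKeyB, h]
  | some t =>
    simp only [pvKeyB, h]
    rw [pvRank_getD]; split_ifs <;> omega

lemma pvKeyB_match (x : List (String × String)) (i : Nat) (hi : i < 6) :
    (x.lookup "type" == some (pvPriority[i]'(by simpa [pvPriority] using hi)))
      = decide (pvKeyB x = (i : Int)) := by
  cases h : x.lookup "type" with
  | none =>
    simp only [pvKeyB, h]
    interval_cases i <;> simp
  | some t =>
    simp only [pvKeyB, h]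
    rw [pvRank_getD]
    interval_cases i <;>
      · simp only [pvPriority, List.getElem_cons_zero, List.getElem_cons_succ]
        split_ifs with h1 h2 h3 h4 h5 h6 <;> simp_all <;> (intro hh; subst hh; simp_all)

-- ----- A side -----
lemma pvScanA_eq_find? (t : String) (xs : List (List (String × String))) :
    pvScanA t xs = xs.find? (fun x => x.lookup "type" == some t) := by
  induction xs with
  | nil => rfl
  | cons x r ih =>
    simp only [pvScanA, List.find?]
    cases h : (x.lookup "type" == some t)
    · simp [ih]
    · simp

lemma pvScanA_none {t xs} (h : pvScanA t xs = none) :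
    ∀ x ∈ xs, ¬ (x.lookup "type" == some t) = true := by
  rw [pvScanA_eq_find?] at h
  simpa using List.find?_eq_none.mp h

lemma pvScanA_firstMin {xs r} (i : Nat) (hi : i < 6)
    (hlb : ∀ x ∈ xs, (i : Int) ≤ pvKeyB x)
    (h : pvScanA (pvPriority[i]'(by simpa [pvPriority] using hi)) xs = some r) :
    pvIsFirstMin pvKeyB xs r := by
  rw [pvScanA_eq_find?] at h
  obtain ⟨hr, l, t, he, hl⟩ := List.find?_eq_some_iff_append.mp h
  rw [pvKeyB_match r i hi] at hr
  have hkr : pvKeyB r = (i : Int) := of_decide_eq_true hr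
  refine ⟨l, t, he, ?_, ?_⟩
  · intro y hy
    have h1 : (i : Int) ≤ pvKeyB y := hlb y (he ▸ List.mem_append.mpr (Or.inl hy))
    have h2 := hl y hy
    rw [pvKeyB_match y i hi] at h2
    have : ¬ pvKeyB y = (i : Int) := by simpa using h2
    omega
  · intro y hy
    have h1 : (i : Int) ≤ pvKeyB y := hlb y (he ▸ List.mem_append.mpr (Or.inr (List.mem_cons_of_mem _ hy)))
    omega

lemma pvScanA_none_lb {xs : List (List (String × String))} (i : Nat) (hi : i < 6)
    (h : pvScanA (pvPriority[i]'(by simpa [pvPriority] using hi)) xs = none) :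
    ∀ x ∈ xs, pvKeyB x ≠ (i : Int) := by
  intro x hx
  have hh := pvScanA_none h x hx
  rw [pvKeyB_match x i hi] at hh
  simpa using hh

lemma pvLoopA_firstMin {xs : List (List (String × String))} (hne : xs ≠ []) :
    ∀ r, get_primary_issue xs = some r → pvIsFirstMin pvKeyB xs r := by
  obtain ⟨first, rest, rfl⟩ := List.exists_cons_of_ne_nil hne
  intro r h
  have hlb0 : ∀ x ∈ first :: rest, ((0 : Nat) : Int) ≤ pvKeyB x := by
    intro x _; have := (pvKeyB_range x).1; push_cast; omega
  simp only [get_primary_issue, pvPriority, pvLoopA] at h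
  cases h0 : pvScanA "back_rounding" (first :: rest) with
  | some r0 =>
    simp only [h0] at h
    rw [← Option.some_inj.mp h]
    exact pvScanA_firstMin 0 (by omega) (fun x hx => by have := hlb0 x hx; push_cast at this ⊢; omega) h0
  | none =>
    simp only [h0] at h
    have hlb1 : ∀ x ∈ first :: rest, ((1 : Nat) : Int) ≤ pvKeyB x := by
      intro x hx
      have ha := pvScanA_none_lb 0 (by omega) h0 x hx
      have hb := hlb0 x hx
      push_cast at ha hb ⊢; omega
    cases h1 : pvScanA "knee_valgus" (first :: rest) with
    | some r0 =>
      simp only [h1] at h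
      rw [← Option.some_inj.mp h]
      exact pvScanA_firstMin 1 (by omega) (fun x hx => by have := hlb1 x hx; push_cast at this ⊢; omega) h1
    | none =>
      simp only [h1] at h
      have hlb2 : ∀ x ∈ first :: rest, ((2 : Nat) : Int) ≤ pvKeyB x := by
        intro x hx
        have ha := pvScanA_none_lb 1 (by omega) h1 x hx
        have hb := hlb1 x hx
        push_cast at ha hb ⊢; omega
      cases h2 : pvScanA "knee_alignment" (first :: rest) with
      | some r0 =>
        simp only [h2] at h
        rw [← Option.some_inj.mp h]
        exact pvScanA_firstMin 2 (by omega) (fun x hx => by have := hlb2 x hx; push_cast at this ⊢; omega) h2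
      | none =>
        simp only [h2] at h
        have hlb3 : ∀ x ∈ first :: rest, ((3 : Nat) : Int) ≤ pvKeyB x := by
          intro x hx
          have ha := pvScanA_none_lb 2 (by omega) h2 x hx
          have hb := hlb2 x hx
          push_cast at ha hb ⊢; omega
        cases h3 : pvScanA "insufficient_depth" (first :: rest) with
        | some r0 =>
          simp only [h3] at h
          rw [← Option.some_inj.mp h]
          exact pvScanA_firstMin 3 (by omega) (fun x hx => by have := hlb3 x hx; push_cast at this ⊢; omega) h3
        | none =>
          simp only [h3] at h
          have hlb4 : ∀ x ∈ first :: rest, ((4 : Nat) : Int) ≤ pvKeyB x := by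
            intro x hx
            have ha := pvScanA_none_lb 3 (by omega) h3 x hx
            have hb := hlb3 x hx
            push_cast at ha hb ⊢; omega
          cases h4 : pvScanA "shoulder_tilt" (first :: rest) with
          | some r0 =>
            simp only [h4] at h
            rw [← Option.some_inj.mp h]
            exact pvScanA_firstMin 4 (by omega) (fun x hx => by have := hlb4 x hx; push_cast at this ⊢; omega) h4
          | none =>
            simp only [h4] at h
            have hlb5 : ∀ x ∈ first :: rest, ((5 : Nat) : Int) ≤ pvKeyB x := by
              intro x hx
              have ha := pvScanA_none_lb 4 (by omega) h4 x hx
              have hb := hlb4 x hx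
              push_cast at ha hb ⊢; omega
            cases h5 : pvScanA "arm_position" (first :: rest) with
            | some r0 =>
              simp only [h5] at h
              rw [← Option.some_inj.mp h]
              exact pvScanA_firstMin 5 (by omega) (fun x hx => by have := hlb5 x hx; push_cast at this ⊢; omega) h5
            | none =>
              simp only [h5] at h
              have hlb6 : ∀ x ∈ first :: rest, ((6 : Nat) : Int) ≤ pvKeyB x := by
                intro x hx
                have ha := pvScanA_none_lb 5 (by omega) h5 x hx
                have hb := hlb5 x hx
                push_cast at ha hb ⊢; omega
              rw [← Option.some_inj.mp h]
              refine ⟨[], rest, rfl, by simp, ?_⟩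
              intro y hy
              have h1 := hlb6 first List.mem_cons_self
              have h2 := (pvKeyB_range first).2
              have h3 := hlb6 y (List.mem_cons_of_mem _ hy)
              push_cast at h1 h3; omega

theorem pvEquiv (xs : List (List (String × String))) :
    get_primary_issue xs = get_primary_issue_alt xs := by
  cases xs with
  | nil => rfl
  | cons x t =>
    have hB : get_primary_issue_alt (x :: t) = some (pvRun pvKeyB x t) := pvMin?_cons pvKeyB t x
    have hA : ∃ r, get_primary_issue (x :: t) = some r := by
      simp only [get_primary_issue]
      cases pvLoopA (x :: t) pvPriority <;> simp
    obtain ⟨r, hr⟩ := hA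
    have h1 := pvLoopA_firstMin (by simp) r hr
    have h2 := pvMin?_firstMin (x :: t) (pvRun pvKeyB x t) (pvMin?_cons pvKeyB t x)
    rw [hr, hB, pvIsFirstMin_unique h1 h2]

-- ===== VERDICT (by name: the statement is the Claim_ definition above) =====
theorem get_primary_issue_spec : Claim_equal_get_primary_issue := by
  intro issues _ _
  unfold Spec_get_primary_issue
  exact pvEquiv issues
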